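-- pv_equiv track=rewrite | github.com/PSF-UFRJ/global-ufrj | comp-1/exercicios/Test3.py | contar_fibonacci
-- ===== SOURCE A (Python) =====
-- def fibo(n):
--     """n-ésimo número de Fibonacci
--     >>> fibo(0)
--     0
--
--     >>> fibo(1)
--     1
--
--     >>> fibo(5)
--     5
--
--     >>> fibo(8)
--     21
--     """
--     if n < 0 or not(isinstance(n, int)):
--         return
--     if n == 0:
--         return 0
--     elif n == 1:
--         return 1
--     else:
--         return fibo(n-1) + fibo(n-2)
--
-- def contar_fibonacci(a, b):
--     """Retorna a quantidade de números de Fibonacci presentes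
--     dentro do intervalo [a, b]
--     >>> contar_fibonacci(-1, 0)
--     1
--     >>> contar_fibonacci(0, 0)
--     1
--     >>> contar_fibonacci(0, 3)
--     4
--     >>> contar_fibonacci(4, 9)
--     2
--
--     Esse é o teste randômico para contar_fibonacci:
--     >>> n = randint(1, 20) ; contar_fibonacci(fibo(n), fibo(n+2)) == 3
--     True
--
--     Outro teste mais randomico ainda:
--     >>> n = randint(1, 20); j = randint(1,4) ; contar_fibonacci(fibo(n), fibo(n+j)) == j+1
--     True
--     """
--     index = 0
--     num = 0
--     prev = -1
--     f = fibo(index)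
--     while f <= b:
--         if f >= a and f != prev:
--             num = num + 1
--         index = index + 1
--         prev = f
--         f = fibo(index)
--     return num
-- ===== SOURCE B (Python) =====
-- def contar_fibonacci(a, b):
--     """Retorna a quantidade de números de Fibonacci presentes
--     dentro do intervalo [a, b] (Fibonaccis distintos: 0, 1, 2, 3, 5, ...)."""
--     count = 1 if a <= 0 <= b else 0
--     x, y = 1, 2
--     while x <= b:
--         if x >= a:
--             count += 1
--         x, y = y, x + y
--     return count
-- ===== Notes on version B (the rewrite author's own statement) =====
-- stated objective: faster
-- what changed: B generates Fibonacci numbers iteratively with a rolling pair (0 handled once up front, then 1,2,3,5,...), instead of recomputing each term with the naive exponential recursive fibo and a prev-based duplicate skip.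
import Mathlib
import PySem

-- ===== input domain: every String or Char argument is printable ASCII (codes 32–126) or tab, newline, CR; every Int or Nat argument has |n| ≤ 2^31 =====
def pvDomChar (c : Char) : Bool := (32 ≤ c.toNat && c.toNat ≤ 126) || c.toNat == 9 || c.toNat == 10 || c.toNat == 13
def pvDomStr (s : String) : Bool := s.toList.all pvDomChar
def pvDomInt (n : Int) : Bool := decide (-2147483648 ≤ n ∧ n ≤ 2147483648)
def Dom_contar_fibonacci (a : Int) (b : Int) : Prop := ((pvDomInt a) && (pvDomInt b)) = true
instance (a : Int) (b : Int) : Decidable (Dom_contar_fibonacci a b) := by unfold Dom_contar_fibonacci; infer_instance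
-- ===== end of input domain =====

-- B replaces A's naive exponential recursive `fibo` (recomputed at every loop step) by a
-- rolling-pair Fibonacci generation, counting 0 up front and then 1,2,3,5,... (objective: faster).

-- ===== PORT A =====
-- A's helper fibo: naive double recursion (only ever called with index ≥ 0 by the loop).
def fiboA : Nat → Int
  | 0 => 0
  | 1 => 1
  | n + 2 => fiboA (n + 1) + fiboA n

-- A's while loop. `fuel` is only a totality guard for the unbounded `while f <= b`:
-- under Dom (b ≤ 2^31 < fib 47) the loop exits long before the fuel runs out.
def loopA (a b : Int) : Nat → Nat → Int → Int → Int
  | 0, _, num, _ => num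
  | fuel + 1, index, num, prev =>
    let f := fiboA index
    if f ≤ b then
      loopA a b fuel (index + 1) (if a ≤ f ∧ f ≠ prev then num + 1 else num) f
    else num

def contar_fibonacci (a : Int) (b : Int) : Int := loopA a b 100 0 0 (-1)

-- ===== PORT B =====
-- B's while loop: rolling pair (x, y), count x when a ≤ x. Same fuel-as-totality-guard.
def loopB (a b : Int) : Nat → Int → Int → Int → Int
  | 0, _, _, cnt => cnt
  | fuel + 1, x, y, cnt =>
    if x ≤ b then loopB a b fuel y (x + y) (if a ≤ x then cnt + 1 else cnt) else cnt

def contar_fibonacci_alt (a : Int) (b : Int) : Int :=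
  loopB a b 100 1 2 (if a ≤ 0 ∧ 0 ≤ b then 1 else 0)

-- ===== PRECONDITION & SPEC =====
def Spec_contar_fibonacci (a : Int) (b : Int) (out : Int) : Prop := out = contar_fibonacci_alt a b
instance (a : Int) (b : Int) (out : Int) : Decidable (Spec_contar_fibonacci a b out) := by unfold Spec_contar_fibonacci; infer_instance

-- ===== CLAIM (what is proved, stated in full; the proofs are below) =====
def Claim_equal_contar_fibonacci : Prop := ∀ (a : Int) (b : Int), Dom_contar_fibonacci a b → Spec_contar_fibonacci a b (contar_fibonacci a b)

-- ===== LEMMAS AND PROOFS =====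

theorem fiboA_eq : ∀ n, fiboA n = (Nat.fib n : Int)
  | 0 => rfl
  | 1 => rfl
  | n + 2 => by
    rw [fiboA, fiboA_eq (n + 1), fiboA_eq n, Nat.fib_add_two]
    push_cast; ring

theorem loopB_stop (a b : Int) (fuel : Nat) (x y cnt : Int) (h : b < x) :
    loopB a b fuel x y cnt = cnt := by
  cases fuel with
  | zero => rfl
  | succ k => simp [loopB, not_le.mpr h]

-- the synchronized loop correspondence from index i ≥ 3 on
theorem sync (a b : Int) : ∀ (fa fb i : Nat) (cnt : Int), 3 ≤ i →
    b < (Nat.fib (i + fa) : Int) → b < (Nat.fib (i + fb) : Int) →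
    loopA a b fa i cnt (fiboA (i - 1)) =
      loopB a b fb (fiboA i) (fiboA (i + 1)) cnt := by
  intro fa
  induction fa with
  | zero =>
    intro fb i cnt hi ha _
    rw [loopA, loopB_stop]
    rw [fiboA_eq]; simpa using ha
  | succ fa ih =>
    intro fb i cnt hi ha hb
    by_cases hfb : fiboA i ≤ b
    · -- loop bodies both fire
      have hprev : fiboA (i - 1) < fiboA i := by
        have h2 : 2 ≤ i - 1 := by omega
        have := Nat.fib_lt_fib_succ h2
        rw [fiboA_eq, fiboA_eq]
        have hie : i - 1 + 1 = i := by omega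
        rw [hie] at this
        exact_mod_cast this
      have hne : fiboA i ≠ fiboA (i - 1) := (ne_of_gt hprev)
      cases fb with
      | zero =>
        exfalso
        have : b < (Nat.fib i : Int) := by simpa using hb
        rw [fiboA_eq] at hfb; omega
      | succ fb =>
        rw [loopA, loopB]
        simp only [hfb, if_pos]
        have hsum : fiboA i + fiboA (i + 1) = fiboA (i + 2) := by
          rw [fiboA]; ring
        have hcnt : (if a ≤ fiboA i ∧ fiboA i ≠ fiboA (i - 1) then cnt + 1 else cnt)
            = (if a ≤ fiboA i then cnt + 1 else cnt) := by
          simp [hne]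
        rw [hcnt, hsum]
        have hi1 : i + 1 - 1 = i := by omega
        have := ih fb (i + 1) (if a ≤ fiboA i then cnt + 1 else cnt) (by omega)
          (by rw [show i + 1 + fa = i + (fa + 1) by ring]; exact ha)
          (by rw [show i + 1 + fb = i + (fb + 1) by ring]; exact hb)
        rw [hi1] at this
        exact this
    · -- both loops terminate immediately
      rw [loopA]
      simp only [hfb, if_false]
      rw [loopB_stop]
      omega

theorem fib47 : (Nat.fib 47 : Int) = 2971215073 := by decide

theorem b_lt_fib (b : Int) (hb : b ≤ 2147483648) (n : Nat) (hn : 47 ≤ n) :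
    b < (Nat.fib n : Int) := by
  have := Nat.fib_mono hn
  have h47 : (Nat.fib 47 : Int) ≤ (Nat.fib n : Int) := by exact_mod_cast this
  rw [fib47] at h47
  omega

-- ===== VERDICT (by name: the statement is the Claim_ definition above) =====
theorem contar_fibonacci_spec : Claim_equal_contar_fibonacci := by
  unfold Claim_equal_contar_fibonacci
  intro a b hdom
  unfold Spec_contar_fibonacci contar_fibonacci contar_fibonacci_alt
  have hb : b ≤ 2147483648 := by
    unfold Dom_contar_fibonacci pvDomInt at hdom
    simp only [Bool.and_eq_true, decide_eq_true_eq] at hdom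
    exact hdom.2.2
  by_cases hb0 : (0 : Int) ≤ b
  · by_cases hb1 : (1 : Int) ≤ b
    · -- unfold index 0,1,2 of A and the first step of B, then sync at i = 3
      have hA : loopA a b 100 0 0 (-1)
          = loopA a b 97 3 ((if a ≤ 0 then (0:Int) + 1 else 0) + (if a ≤ 1 then 1 else 0)) (fiboA 2) := by
        rw [loopA]
        simp only [show fiboA 0 = 0 from rfl]
        rw [if_pos hb0, loopA]
        simp only [show fiboA 1 = 1 from rfl]
        rw [if_pos hb1, loopA]
        simp only [show fiboA 2 = 1 from rfl]
        rw [if_pos hb1]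
        norm_num
        split_ifs <;> simp_all
      have hB : loopB a b 100 1 2 (if a ≤ 0 ∧ 0 ≤ b then 1 else 0)
          = loopB a b 99 (fiboA 3) (fiboA 4)
              ((if a ≤ 0 then (0:Int) + 1 else 0) + (if a ≤ 1 then 1 else 0)) := by
        rw [loopB, if_pos hb1]
        simp only [show fiboA 3 = 2 from rfl, show fiboA 4 = 3 from rfl]
        norm_num
        split_ifs <;> simp_all
      rw [hA, hB]
      exact sync a b 97 99 3 _ (by omega)
        (b_lt_fib b hb 100 (by omega)) (b_lt_fib b hb 102 (by omega))
    · -- b = 0: A counts only fib(0) = 0; B's loop exits at once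
      rw [loopA]
      simp only [show fiboA 0 = (0:Int) from rfl]
      rw [if_pos hb0, loopA]
      simp only [show fiboA 1 = (1:Int) from rfl]
      rw [if_neg hb1, loopB_stop a b 100 1 2 _ (by omega)]
      split_ifs <;> simp_all
  · -- b < 0: both return 0
    rw [loopA]
    simp only [show fiboA 0 = (0:Int) from rfl]
    rw [if_neg hb0, loopB_stop a b 100 1 2 _ (by omega)]
    simp [hb0]
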